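-- pv_equiv track=rewrite | github.com/Julien00859/BotIRC | Bot5262.py | fsender
-- ===== SOURCE A (Python) =====
-- def fsender(chaine):
--     sender = str()
--     b = True
--     for lettre in chaine:
--         if lettre != ":" and b == True and lettre != "!":
--             sender+=lettre
--         if lettre == "!":
--             b = False
--     return sender
-- ===== SOURCE B (Python) =====
-- def fsender(chaine):
--     prefix = chaine.partition('!')[0]
--     return ''.join(c for c in prefix if c != ':')
-- ===== Notes on version B (the rewrite author's own statement) =====
-- stated objective: idiomatic
-- what changed: Replaces A's single fused character loop with a mutable boolean flag by two separate phases: take the prefix before the first delimiter with str.partition, then drop colons with a filtering join.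
import Mathlib
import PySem

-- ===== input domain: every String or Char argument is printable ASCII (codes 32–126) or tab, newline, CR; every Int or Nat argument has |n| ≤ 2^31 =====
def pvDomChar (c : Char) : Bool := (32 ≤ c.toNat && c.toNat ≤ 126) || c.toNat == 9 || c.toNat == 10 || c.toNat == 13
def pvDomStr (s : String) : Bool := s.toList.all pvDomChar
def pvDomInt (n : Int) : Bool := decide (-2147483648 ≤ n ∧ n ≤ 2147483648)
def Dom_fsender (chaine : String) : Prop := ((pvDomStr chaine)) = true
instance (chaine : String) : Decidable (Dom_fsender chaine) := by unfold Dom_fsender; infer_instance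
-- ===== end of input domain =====

-- B replaces A's fused char-loop with a flag by two phases: prefix before first '!' (partition), then a colon-dropping filter (idiomatic; same O(n) cost).


-- ===== PORT A =====
-- one pass; state = (sender accumulated so far, flag b)
def fsenderStep (st : List Char × Bool) (lettre : Char) : List Char × Bool :=
  let sender := if lettre ≠ ':' ∧ st.2 = true ∧ lettre ≠ '!' then st.1 ++ [lettre] else st.1
  let b := if lettre = '!' then false else st.2
  (sender, b)

def fsender (chaine : String) : String :=
  String.ofList (chaine.toList.foldl fsenderStep ([], true)).1

-- ===== PORT B =====
-- chaine.partition('!')[0] = prefix before the first '!' (takeWhile); then a filtering join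
def fsender_alt (chaine : String) : String :=
  String.ofList ((chaine.toList.takeWhile (· ≠ '!')).filter (· ≠ ':'))

-- ===== PRECONDITION & SPEC =====
def Spec_fsender (chaine : String) (out : String) : Prop := out = fsender_alt chaine
instance (chaine : String) (out : String) : Decidable (Spec_fsender chaine out) := by unfold Spec_fsender; infer_instance

-- ===== CLAIM (what is proved, stated in full; the proofs are below) =====
def Claim_equal_fsender : Prop := ∀ (chaine : String), Dom_fsender chaine → Spec_fsender chaine (fsender chaine)

-- ===== LEMMAS AND PROOFS =====
-- once the flag is false, the fold no longer changes the accumulator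
theorem fsender_foldl_false (l : List Char) (acc : List Char) :
    l.foldl fsenderStep (acc, false) = (acc, false) := by
  induction l generalizing acc with
  | nil => rfl
  | cons c l ih =>
      simp only [List.foldl_cons, fsenderStep]
      simpa using ih acc

-- loop invariant: from (acc, true) the fold appends the colon-filtered prefix before the first '!'
theorem fsender_foldl_true (l : List Char) (acc : List Char) :
    (l.foldl fsenderStep (acc, true)).1
      = acc ++ (l.takeWhile (· ≠ '!')).filter (· ≠ ':') := by
  induction l generalizing acc with
  | nil => simp
  | cons c l ih =>
      by_cases hb : c = '!'
      · subst hb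
        simp only [List.foldl_cons, fsenderStep]
        simp [fsender_foldl_false, List.takeWhile]
      · by_cases hc : c = ':'
        · subst hc
          simp only [List.foldl_cons, fsenderStep]
          simp [ih, List.takeWhile]
        · simp only [List.foldl_cons, fsenderStep]
          simp [hb, hc, ih, List.takeWhile]

-- ===== VERDICT (by name: the statement is the Claim_ definition above) =====
theorem fsender_spec : Claim_equal_fsender := by
  intro chaine _
  unfold Spec_fsender fsender fsender_alt
  rw [fsender_foldl_true]
  simp
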